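-- pv_equiv track=rewrite | github.com/intzy/ProjectEuler | src/pb165.py | problem165
-- ===== SOURCE A (Python) =====
-- from itertools import combinations
-- from math import gcd
--
-- def problem165(N=5000):
--     L = get_line_segments(N)
--     true_intersections = set()
--     for L1, L2 in combinations(L, 2):
--         x = get_intersection(L1, L2)
--         if x:
--             true_intersections.add(x)
--     return len(true_intersections)
--
-- def get_line_segments(N):
--     s = [290797]
--     for _ in range(1, 4 * N + 1):
--         s.append(s[-1] * s[-1] % 50515093)
--     t = [x % 500 for x in s]
--     return [t[n : n + 4] for n in range(1, 4 * N + 1, 4)]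
--
-- def get_intersection(L1, L2):
--     x1, y1, x2, y2 = L1
--     z1, w1, z2, w2 = L2
--     a1 = x2 - x1
--     a2 = z1 - z2
--     a3 = y2 - y1
--     a4 = w1 - w2
--     b1 = z1 - x1
--     b2 = w1 - y1
--     det = a1 * a4 - a2 * a3
--     if not det:
--         return False
--     sign = abs(det) // det
--     t = (a4 * b1 - a2 * b2) * sign
--     u = (a1 * b2 - a3 * b1) * sign
--     det *= sign
--     if t <= 0 or t >= det or u <= 0 or u >= det:
--         return False
--     p = (det * x1 + (x2 - x1) * t, det)
--     q = (det * w1 + (w2 - w1) * u, det)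
--     dp = gcd(p[0], p[1])
--     dq = gcd(q[0], q[1])
--     p = (p[0] // dp, p[1] // dp)
--     q = (q[0] // dq, q[1] // dq)
--     return (p, q)
-- ===== SOURCE B (Python) =====
-- from math import gcd
--
-- def problem165(N=5000):
--     # generate the segments streaming the BBS values, four at a time
--     segs = []
--     s = 290797
--     for _ in range(N):
--         s1 = s * s % 50515093
--         s2 = s1 * s1 % 50515093
--         s3 = s2 * s2 % 50515093
--         s4 = s3 * s3 % 50515093
--         segs.append([s1 % 500, s2 % 500, s3 % 500, s4 % 500])
--         s = s4
--     # sweep by x: sort by leftmost x, keep an active list pruned by rightmost x,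
--     # so only pairs whose x-extents overlap are ever tested
--     order = sorted(segs, key=lambda a: min(a[0], a[2]))
--     pts = set()
--     active = []
--     for b in order:
--         lo = min(b[0], b[2])
--         active = [a for a in active if max(a[0], a[2]) >= lo]
--         for a in active:
--             p = crossing(a, b)
--             if p is not None:
--                 pts.add(p)
--         active.append(b)
--     return len(pts)
--
-- def _frac(n, d):
--     if d < 0:
--         n, d = -n, -d
--     g = gcd(n, d)
--     return (n // g, d // g)
--
-- def crossing(s1, s2):
--     x1, y1, x2, y2 = s1
--     z1, w1, z2, w2 = s2
--     a1 = x2 - x1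
--     a2 = z1 - z2
--     a3 = y2 - y1
--     a4 = w1 - w2
--     b1 = z1 - x1
--     b2 = w1 - y1
--     det = a1 * a4 - a2 * a3
--     t = a4 * b1 - a2 * b2
--     u = a1 * b2 - a3 * b1
--     if det > 0:
--         ok = 0 < t < det and 0 < u < det
--     elif det < 0:
--         ok = det < t < 0 and det < u < 0
--     else:
--         ok = False
--     if not ok:
--         return None
--     return (_frac(det * x1 + a1 * t, det), _frac(det * w1 + (w2 - w1) * u, det))
-- ===== Notes on version B (the rewrite author's own statement) =====
-- stated objective: alternative
-- what changed: B replaces A's all-pairs scan (itertools.combinations over every pair) by a sweep over the x-axis: segments are sorted by leftmost x and tested only against an active list pruned by rightmost x, so pairs whose x-extents are disjoint are never tested (proved: such pairs cannot cross); segments are generated by streaming the BBS values four at a time instead of building the full s/t lists and slicing, and the pairwise test branches on the sign of the determinant instead of normalising by abs(det)//det.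
import Mathlib
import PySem

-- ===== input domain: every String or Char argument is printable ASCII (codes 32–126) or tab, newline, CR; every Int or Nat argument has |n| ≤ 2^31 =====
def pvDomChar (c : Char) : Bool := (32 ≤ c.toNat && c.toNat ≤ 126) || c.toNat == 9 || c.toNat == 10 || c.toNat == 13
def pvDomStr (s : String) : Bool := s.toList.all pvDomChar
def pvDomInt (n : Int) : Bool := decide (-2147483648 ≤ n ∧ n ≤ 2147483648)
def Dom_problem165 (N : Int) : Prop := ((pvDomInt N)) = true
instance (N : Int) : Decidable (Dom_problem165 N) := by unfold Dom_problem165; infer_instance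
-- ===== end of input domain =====

-- B replaces A's all-pairs scan (itertools.combinations over every pair of segments) by an
-- x-sweep: segments sorted by leftmost x, an active list pruned by rightmost x, so only pairs
-- whose x-extents overlap are ever tested; segments are generated by streaming the BBS values
-- four at a time instead of building the full s/t lists and slicing, and the pairwise test
-- branches on the sign of the determinant instead of normalising by abs(det)//det.

-- ===== PORT A =====
-- get_intersection: the tuple unpacking 'x1, y1, x2, y2 = L1' would raise on a list of length ≠ 4;
-- that is unreachable here (every segment has 4 entries), the catch-all returns none.
def getIntersection (L1 L2 : List Int) : Option ((Int × Int) × (Int × Int)) :=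
  match L1, L2 with
  | [x1, y1, x2, y2], [z1, w1, z2, w2] =>
    let a1 := x2 - x1
    let a2 := z1 - z2
    let a3 := y2 - y1
    let a4 := w1 - w2
    let b1 := z1 - x1
    let b2 := w1 - y1
    let det := a1 * a4 - a2 * a3
    if det = 0 then none
    else
      let sign := PySem.Int.floordiv |det| det
      let t := (a4 * b1 - a2 * b2) * sign
      let u := (a1 * b2 - a3 * b1) * sign
      let det2 := det * sign
      if t ≤ 0 ∨ det2 ≤ t ∨ u ≤ 0 ∨ det2 ≤ u then none
      else
        let p := (det2 * x1 + (x2 - x1) * t, det2)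
        let q := (det2 * w1 + (w2 - w1) * u, det2)
        let dp : Int := Int.gcd p.1 p.2
        let dq : Int := Int.gcd q.1 q.2
        some ((PySem.Int.floordiv p.1 dp, PySem.Int.floordiv p.2 dp),
              (PySem.Int.floordiv q.1 dq, PySem.Int.floordiv q.2 dq))
  | _, _ => none

def getLineSegments (N : Int) : List (List Int) :=
  let s := (PySem.List.pyRange 1 (4 * N + 1)).foldl
      (fun s _ =>
        s ++ [PySem.Int.mod (PySem.List.pyGetD s (-1) 0 * PySem.List.pyGetD s (-1) 0) 50515093])
      [290797]
  let t := s.map (fun x => PySem.Int.mod x 500)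
  (PySem.List.pyRange 1 (4 * N + 1) 4).map (fun n => PySem.List.slice t (some n) (some (n + 4)))

def problem165 (N : Int) : Int :=
  let L := getLineSegments N
  let trueIntersections := (PySem.List.combinations L 2).foldl
      (fun (st : PySem.Set ((Int × Int) × (Int × Int))) c =>
        match c with
        | [L1, L2] =>
          match getIntersection L1 L2 with
          | some x => PySem.Set.add st x
          | none => st
        | _ => st)
      PySem.Set.empty
  PySem.Set.len trueIntersections

-- ===== PORT B =====
def frac (n d : Int) : Int × Int :=
  let nd := if d < 0 then (-n, -d) else (n, d)
  let g : Int := Int.gcd nd.1 nd.2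
  (PySem.Int.floordiv nd.1 g, PySem.Int.floordiv nd.2 g)

-- the body of crossing after the 8-variable unpacking
def crossCore (x1 y1 x2 y2 z1 w1 z2 w2 : Int) : Option ((Int × Int) × (Int × Int)) :=
  let a1 := x2 - x1
  let a2 := z1 - z2
  let a3 := y2 - y1
  let a4 := w1 - w2
  let b1 := z1 - x1
  let b2 := w1 - y1
  let det := a1 * a4 - a2 * a3
  let t := a4 * b1 - a2 * b2
  let u := a1 * b2 - a3 * b1
  let ok := if 0 < det then decide (0 < t ∧ t < det ∧ 0 < u ∧ u < det)
            else if det < 0 then decide (det < t ∧ t < 0 ∧ det < u ∧ u < 0)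
            else false
  if ok then some (frac (det * x1 + a1 * t) det, frac (det * w1 + (w2 - w1) * u) det)
  else none

-- crossing: same unreachable catch-all for a segment of length ≠ 4 as in port A.
def crossing (s1 s2 : List Int) : Option ((Int × Int) × (Int × Int)) :=
  match s1, s2 with
  | [x1, y1, x2, y2], [z1, w1, z2, w2] => crossCore x1 y1 x2 y2 z1 w1 z2 w2
  | _, _ => none

-- min(a[0], a[2]) / max(a[0], a[2]); the indices are always in range (every segment has 4 entries)
def lox (a : List Int) : Int := min (PySem.List.pyGetD a 0 0) (PySem.List.pyGetD a 2 0)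
def hix (a : List Int) : Int := max (PySem.List.pyGetD a 0 0) (PySem.List.pyGetD a 2 0)

-- one iteration of the sweep loop: prune the active list, test b against it, append b
def sweepStep (st : List (List Int) × PySem.Set ((Int × Int) × (Int × Int))) (b : List Int) :
    List (List Int) × PySem.Set ((Int × Int) × (Int × Int)) :=
  let lo := lox b
  let active := st.1.filter (fun a => decide (lo ≤ hix a))
  let pts := active.foldl
      (fun pts a =>
        match crossing a b with
        | some p => PySem.Set.add pts p
        | none => pts) st.2
  (active ++ [b], pts)

def problem165_alt (N : Int) : Int :=
  let st := (PySem.List.pyRange 0 N).foldl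
      (fun (acc : Int × List (List Int)) _ =>
        let s1 := PySem.Int.mod (acc.1 * acc.1) 50515093
        let s2 := PySem.Int.mod (s1 * s1) 50515093
        let s3 := PySem.Int.mod (s2 * s2) 50515093
        let s4 := PySem.Int.mod (s3 * s3) 50515093
        (s4, acc.2 ++
          [[PySem.Int.mod s1 500, PySem.Int.mod s2 500, PySem.Int.mod s3 500, PySem.Int.mod s4 500]]))
      (290797, [])
  let order := PySem.List.sorted st.2 lox
  let fin := order.foldl sweepStep ([], PySem.Set.empty)
  PySem.Set.len fin.2

-- ===== PRECONDITION & SPEC =====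
def Spec_problem165 (N : Int) (out : Int) : Prop := out = problem165_alt N
instance (N : Int) (out : Int) : Decidable (Spec_problem165 N out) := by unfold Spec_problem165; infer_instance

-- ===== CLAIM (what is proved, stated in full; the proofs are below) =====
def Claim_equal_problem165 : Prop := ∀ (N : Int), Dom_problem165 N → Spec_problem165 N (problem165 N)

-- ===== LEMMAS AND PROOFS =====

-- the 8-integer core of get_intersection agrees with crossing's core
lemma inter_core_eq (x1 y1 x2 y2 z1 w1 z2 w2 : Int) :
    getIntersection [x1, y1, x2, y2] [z1, w1, z2, w2] = crossCore x1 y1 x2 y2 z1 w1 z2 w2 := by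
  unfold getIntersection crossCore
  simp only []
  set det := (x2 - x1) * (w1 - w2) - (z1 - z2) * (y2 - y1) with hdet
  set t0 := (w1 - w2) * (z1 - x1) - (z1 - z2) * (w1 - y1) with ht0
  set u0 := (x2 - x1) * (w1 - y1) - (y2 - y1) * (z1 - x1) with hu0
  rcases lt_trichotomy det 0 with hd | hd | hd
  · -- det < 0
    have hsign : PySem.Int.floordiv |det| det = -1 := by
      rw [abs_of_neg hd, show (-det) = (-1) * det by ring]
      exact Int.mul_fdiv_cancel _ (ne_of_lt hd)
    rw [if_neg (by omega), hsign, if_neg (by omega : ¬ (0 : Int) < det), if_pos hd]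
    by_cases hc : det < t0 ∧ t0 < 0 ∧ det < u0 ∧ u0 < 0
    · rw [if_neg (by omega), if_pos (by simpa using hc)]
      have e1 : det * -1 * x1 + (x2 - x1) * (t0 * -1) = -(det * x1 + (x2 - x1) * t0) := by ring
      have e2 : det * -1 * w1 + (w2 - w1) * (u0 * -1) = -(det * w1 + (w2 - w1) * u0) := by ring
      rw [e1, e2]
      simp [frac, if_pos hd]
    · rw [if_pos (by omega), if_neg (by simpa using hc)]
  · simp [hd]
  · -- 0 < det
    have hsign : PySem.Int.floordiv |det| det = 1 := by
      rw [abs_of_pos hd, PySem.Int.floordiv_eq_ediv_of_pos hd, Int.ediv_self (by omega)]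
    rw [if_neg (by omega), hsign, if_pos hd]
    by_cases hc : 0 < t0 ∧ t0 < det ∧ 0 < u0 ∧ u0 < det
    · rw [if_neg (by omega), if_pos (by simpa using hc)]
      simp [frac, if_neg (by omega : ¬ det < 0)]
    · rw [if_pos (by omega), if_neg (by simpa using hc)]

lemma inter_eq (L1 L2 : List Int) : getIntersection L1 L2 = crossing L1 L2 := by
  rcases L1 with _ | ⟨x1, _ | ⟨y1, _ | ⟨x2, _ | ⟨y2, _ | ⟨e, L1r⟩⟩⟩⟩⟩ <;>
    rcases L2 with _ | ⟨z1, _ | ⟨w1, _ | ⟨z2, _ | ⟨w2, _ | ⟨f, L2r⟩⟩⟩⟩⟩ <;>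
    first
      | rfl
      | exact inter_core_eq x1 y1 x2 y2 z1 w1 z2 w2

-- negating numerator and denominator leaves the canonical fraction unchanged
lemma frac_neg (n d : Int) (hd : d ≠ 0) : frac (-n) (-d) = frac n d := by
  unfold frac
  rcases lt_or_gt_of_ne hd with h | h
  · rw [if_neg (show ¬(-d < 0) by omega), if_pos h]
  · rw [if_pos (show -d < 0 by omega), if_neg (show ¬(d < 0) by omega)]
    simp

-- the crossing test is symmetric in the two segments
lemma crossCore_comm (x1 y1 x2 y2 z1 w1 z2 w2 : Int) :
    crossCore x1 y1 x2 y2 z1 w1 z2 w2 = crossCore z1 w1 z2 w2 x1 y1 x2 y2 := by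
  unfold crossCore
  simp only []
  rw [show (z2 - z1) * (y1 - y2) - (x1 - x2) * (w2 - w1)
        = -((x2 - x1) * (w1 - w2) - (z1 - z2) * (y2 - y1)) from by ring,
      show (y1 - y2) * (x1 - z1) - (x1 - x2) * (y1 - w1)
        = -((x2 - x1) * (w1 - y1) - (y2 - y1) * (z1 - x1)) from by ring,
      show (z2 - z1) * (y1 - w1) - (w2 - w1) * (x1 - z1)
        = -((w1 - w2) * (z1 - x1) - (z1 - z2) * (w1 - y1)) from by ring]
  set det := (x2 - x1) * (w1 - w2) - (z1 - z2) * (y2 - y1) with hdet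
  set t0 := (w1 - w2) * (z1 - x1) - (z1 - z2) * (w1 - y1) with ht0
  set u0 := (x2 - x1) * (w1 - y1) - (y2 - y1) * (z1 - x1) with hu0
  rcases lt_trichotomy det 0 with hd | hd | hd
  · rw [if_neg (by omega : ¬ (0:Int) < det), if_pos hd, if_pos (by omega : (0:Int) < -det)]
    rw [show (decide (0 < -u0 ∧ -u0 < -det ∧ 0 < -t0 ∧ -t0 < -det))
          = (decide (det < t0 ∧ t0 < 0 ∧ det < u0 ∧ u0 < 0)) from by
        rw [decide_eq_decide]; omega]
    by_cases hc : det < t0 ∧ t0 < 0 ∧ det < u0 ∧ u0 < 0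
    · rw [if_pos (by simpa using hc), if_pos (by simpa using hc)]
      rw [show -det * z1 + (z2 - z1) * -u0 = -(det * x1 + (x2 - x1) * t0) from by
            rw [hdet, ht0, hu0]; ring,
          show -det * y1 + (y2 - y1) * -t0 = -(det * w1 + (w2 - w1) * u0) from by
            rw [hdet, ht0, hu0]; ring,
          frac_neg _ _ (by omega), frac_neg _ _ (by omega)]
    · rw [if_neg (by simpa using hc), if_neg (by simpa using hc)]
  · simp [hd]
  · rw [if_pos hd, if_neg (by omega : ¬ (0:Int) < -det), if_pos (by omega : -det < 0)]
    rw [show (decide (-det < -u0 ∧ -u0 < 0 ∧ -det < -t0 ∧ -t0 < 0))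
          = (decide (0 < t0 ∧ t0 < det ∧ 0 < u0 ∧ u0 < det)) from by
        rw [decide_eq_decide]; omega]
    by_cases hc : 0 < t0 ∧ t0 < det ∧ 0 < u0 ∧ u0 < det
    · rw [if_pos (by simpa using hc), if_pos (by simpa using hc)]
      rw [show -det * z1 + (z2 - z1) * -u0 = -(det * x1 + (x2 - x1) * t0) from by
            rw [hdet, ht0, hu0]; ring,
          show -det * y1 + (y2 - y1) * -t0 = -(det * w1 + (w2 - w1) * u0) from by
            rw [hdet, ht0, hu0]; ring,
          frac_neg _ _ (by omega), frac_neg _ _ (by omega)]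
    · rw [if_neg (by simpa using hc), if_neg (by simpa using hc)]

lemma crossing_comm (a b : List Int) : crossing a b = crossing b a := by
  rcases a with _ | ⟨x1, _ | ⟨y1, _ | ⟨x2, _ | ⟨y2, _ | ⟨e, ar⟩⟩⟩⟩⟩ <;>
    rcases b with _ | ⟨z1, _ | ⟨w1, _ | ⟨z2, _ | ⟨w2, _ | ⟨f, br⟩⟩⟩⟩⟩ <;>
    first
      | rfl
      | exact crossCore_comm x1 y1 x2 y2 z1 w1 z2 w2

-- a strictly interior crossing forces the x-extents to overlap
lemma sep_no_cross (x1 x2 z1 z2 d T U : Int) (hd : 0 < d)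
    (hT0 : 0 < T) (hTd : T < d) (hU0 : 0 < U) (hUd : U < d)
    (hc : d * x1 + (x2 - x1) * T = d * z1 + (z2 - z1) * U)
    (hx1 : x1 < z1) (hx2 : x2 < z1) (hz1 : x1 < z2) (hz2 : x2 < z2) : False := by
  rcases le_total x1 x2 with h | h <;> rcases le_total z1 z2 with h' | h'
  · nlinarith [mul_nonneg (by omega : (0:Int) ≤ x2 - x1) (by omega : (0:Int) ≤ d - T),
               mul_nonneg (by omega : (0:Int) ≤ z2 - z1) (by omega : (0:Int) ≤ U),
               mul_pos hd (by omega : (0:Int) < z1 - x2)]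
  · nlinarith [mul_nonneg (by omega : (0:Int) ≤ x2 - x1) (by omega : (0:Int) ≤ d - T),
               mul_nonneg (by omega : (0:Int) ≤ z1 - z2) (by omega : (0:Int) ≤ d - U),
               mul_pos hd (by omega : (0:Int) < z2 - x2)]
  · nlinarith [mul_nonneg (by omega : (0:Int) ≤ x1 - x2) (by omega : (0:Int) ≤ T),
               mul_nonneg (by omega : (0:Int) ≤ z2 - z1) (by omega : (0:Int) ≤ U),
               mul_pos hd (by omega : (0:Int) < z1 - x1)]
  · nlinarith [mul_nonneg (by omega : (0:Int) ≤ x1 - x2) (by omega : (0:Int) ≤ T),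
               mul_nonneg (by omega : (0:Int) ≤ z1 - z2) (by omega : (0:Int) ≤ d - U),
               mul_pos hd (by omega : (0:Int) < z2 - x1)]

-- segments with disjoint x-extents never cross
lemma crossing_none_of_lt (a b : List Int) (h : hix a < lox b) : crossing a b = none := by
  rcases a with _ | ⟨x1, _ | ⟨y1, _ | ⟨x2, _ | ⟨y2, _ | ⟨e, ar⟩⟩⟩⟩⟩ <;>
    rcases b with _ | ⟨z1, _ | ⟨w1, _ | ⟨z2, _ | ⟨w2, _ | ⟨f, br⟩⟩⟩⟩⟩ <;>
      first
        | rfl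
        | (-- the 4/4 case
           simp only [hix, lox,
             show PySem.List.pyGetD [x1, y1, x2, y2] 0 0 = x1 from rfl,
             show PySem.List.pyGetD [x1, y1, x2, y2] 2 0 = x2 from rfl,
             show PySem.List.pyGetD [z1, w1, z2, w2] 0 0 = z1 from rfl,
             show PySem.List.pyGetD [z1, w1, z2, w2] 2 0 = z2 from rfl,
             max_lt_iff, lt_min_iff] at h
           have hx1 : x1 < z1 := h.1.1
           have hx2 : x2 < z1 := h.1.2
           have hz1 : x1 < z2 := h.2.1
           have hz2 : x2 < z2 := h.2.2
           show crossCore x1 y1 x2 y2 z1 w1 z2 w2 = none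
           unfold crossCore
           simp only []
           set det := (x2 - x1) * (w1 - w2) - (z1 - z2) * (y2 - y1) with hdet
           set t0 := (w1 - w2) * (z1 - x1) - (z1 - z2) * (w1 - y1) with ht0
           set u0 := (x2 - x1) * (w1 - y1) - (y2 - y1) * (z1 - x1) with hu0
           have hcramer : det * x1 + (x2 - x1) * t0 = det * z1 + (z2 - z1) * u0 := by
             rw [hdet, ht0, hu0]; ring
           rcases lt_trichotomy det 0 with hd | hd | hd
           · rw [if_neg (by omega : ¬ (0:Int) < det), if_pos hd]
             rw [show (decide (det < t0 ∧ t0 < 0 ∧ det < u0 ∧ u0 < 0)) = false from by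
               simp only [decide_eq_false_iff_not]
               rintro ⟨h1, h2, h3, h4⟩
               exact sep_no_cross x1 x2 z1 z2 (-det) (-t0) (-u0) (by omega) (by omega)
                 (by omega) (by omega) (by omega) (by linear_combination -hcramer)
                 hx1 hx2 hz1 hz2]
             rfl
           · simp [hd]
           · rw [if_pos hd]
             rw [show (decide (0 < t0 ∧ t0 < det ∧ 0 < u0 ∧ u0 < det)) = false from by
               simp only [decide_eq_false_iff_not]
               rintro ⟨h1, h2, h3, h4⟩
               exact sep_no_cross x1 x2 z1 z2 det t0 u0 hd h1 h2 h3 h4 hcramer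
                 hx1 hx2 hz1 hz2]
             rfl)

-- the square BBS sequence
def gseq : Nat → Int
  | 0 => 290797
  | k + 1 => PySem.Int.mod (gseq k * gseq k) 50515093

def hseq (k : Nat) : Int := PySem.Int.mod (gseq k) 500

def quad (k : Nat) : List Int := [hseq (4 * k + 1), hseq (4 * k + 2), hseq (4 * k + 3), hseq (4 * k + 4)]

-- the crossing points over the ordered pairs i < j
def pairPts : List (List Int) → List ((Int × Int) × (Int × Int))
  | [] => []
  | a :: rest => rest.filterMap (crossing a) ++ pairPts rest

lemma mem_pairPts_cons (a : List Int) (l : List (List Int)) (x : (Int × Int) × (Int × Int)) :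
    x ∈ pairPts (a :: l) ↔ (∃ b ∈ l, crossing a b = some x) ∨ x ∈ pairPts l := by
  simp [pairPts, List.mem_filterMap]

-- the point set over all pairs only depends on the multiset of segments
lemma pairPts_perm {l l' : List (List Int)} (h : l.Perm l') (x : (Int × Int) × (Int × Int)) :
    x ∈ pairPts l ↔ x ∈ pairPts l' := by
  induction h with
  | nil => simp
  | cons a h ih =>
    simp only [mem_pairPts_cons, ih]
    constructor <;> rintro (⟨b, hb, hc⟩ | hr)
    · exact Or.inl ⟨b, h.mem_iff.1 hb, hc⟩
    · exact Or.inr hr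
    · exact Or.inl ⟨b, h.mem_iff.2 hb, hc⟩
    · exact Or.inr hr
  | swap a b l =>
    simp only [mem_pairPts_cons, List.mem_cons]
    constructor <;> rintro (⟨c, (rfl | hc), h⟩ | ⟨c, hc, h⟩ | hr)
    · exact Or.inl ⟨b, Or.inl rfl, by rw [crossing_comm c b]; exact h⟩
    · exact Or.inr (Or.inl ⟨c, hc, h⟩)
    · exact Or.inl ⟨c, Or.inr hc, h⟩
    · exact Or.inr (Or.inr hr)
    · exact Or.inl ⟨a, Or.inl rfl, by rw [crossing_comm c a]; exact h⟩
    · exact Or.inr (Or.inl ⟨c, hc, h⟩)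
    · exact Or.inl ⟨c, Or.inr hc, h⟩
    · exact Or.inr (Or.inr hr)
  | trans _ _ ih1 ih2 => rw [ih1, ih2]

lemma mem_pairPts_append_singleton (p : List (List Int)) (s : List Int)
    (x : (Int × Int) × (Int × Int)) :
    x ∈ pairPts (p ++ [s]) ↔ x ∈ pairPts p ∨ ∃ a ∈ p, crossing a s = some x := by
  induction p with
  | nil => simp [pairPts]
  | cons a l ih =>
    simp only [List.cons_append, mem_pairPts_cons, ih, List.mem_append, List.mem_cons,
      List.not_mem_nil, or_false]
    constructor
    · rintro (⟨b, hb | rfl, hc⟩ | hr | ⟨c, hc, h⟩)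
      · exact Or.inl (Or.inl ⟨b, hb, hc⟩)
      · exact Or.inr ⟨a, Or.inl rfl, hc⟩
      · exact Or.inl (Or.inr hr)
      · exact Or.inr ⟨c, Or.inr hc, h⟩
    · rintro ((⟨b, hb, hc⟩ | hr) | ⟨c, rfl | hc, h⟩)
      · exact Or.inl ⟨b, Or.inl hb, hc⟩
      · exact Or.inr (Or.inl hr)
      · exact Or.inl ⟨s, Or.inr rfl, h⟩
      · exact Or.inr (Or.inr ⟨c, hc, h⟩)

-- membership through the inner add-loop of one sweep step
lemma mem_addFold (b : List Int) (l : List (List Int))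
    (pts : PySem.Set ((Int × Int) × (Int × Int))) (x : (Int × Int) × (Int × Int)) :
    (x ∈ l.foldl (fun pts a =>
        match crossing a b with
        | some p => PySem.Set.add pts p
        | none => pts) pts) ↔ x ∈ pts ∨ ∃ a ∈ l, crossing a b = some x := by
  induction l generalizing pts with
  | nil => simp
  | cons a l ih =>
    rw [List.foldl_cons]
    cases h : crossing a b with
    | none =>
      simp only [ih, List.mem_cons]
      constructor
      · rintro (hp | ⟨c, hc, hcc⟩)
        · exact Or.inl hp
        · exact Or.inr ⟨c, Or.inr hc, hcc⟩
      · rintro (hp | ⟨c, rfl | hc, hcc⟩)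
        · exact Or.inl hp
        · rw [h] at hcc; cases hcc
        · exact Or.inr ⟨c, hc, hcc⟩
    | some p =>
      simp only [ih, PySem.Set.mem_add, List.mem_cons]
      constructor
      · rintro ((hp | rfl) | ⟨c, hc, hcc⟩)
        · exact Or.inl hp
        · exact Or.inr ⟨a, Or.inl rfl, h⟩
        · exact Or.inr ⟨c, Or.inr hc, hcc⟩
      · rintro (hp | ⟨c, rfl | hc, hcc⟩)
        · exact Or.inl (Or.inl hp)
        · rw [h] at hcc; exact Or.inl (Or.inr (by cases hcc; rfl))
        · exact Or.inr ⟨c, hc, hcc⟩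

lemma addFold_nodup (b : List Int) (l : List (List Int))
    (pts : PySem.Set ((Int × Int) × (Int × Int))) (h : pts.Nodup) :
    (l.foldl (fun pts a =>
        match crossing a b with
        | some p => PySem.Set.add pts p
        | none => pts) pts).Nodup := by
  induction l generalizing pts with
  | nil => exact h
  | cons a l ih =>
    rw [List.foldl_cons]
    cases hc : crossing a b with
    | none => exact ih pts h
    | some p => exact ih _ (PySem.Set.nodup_add pts p h)

lemma sweep_nodup (r : List (List Int)) (active : List (List Int))
    (pts : PySem.Set ((Int × Int) × (Int × Int))) (h : pts.Nodup) :
    (r.foldl sweepStep (active, pts)).2.Nodup := by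
  induction r generalizing active pts with
  | nil => exact h
  | cons b r ih => exact ih _ _ (addFold_nodup b _ pts h)

-- the sweep invariant: pruned segments never cross anything still to come,
-- and the collected set holds exactly the pair points of the segments seen so far
lemma sweep_invariant (r : List (List Int)) :
    ∀ (seen active : List (List Int)) (pts : PySem.Set ((Int × Int) × (Int × Int))),
    r.Pairwise (fun b b' => lox b ≤ lox b') →
    (∀ a ∈ seen, a ∉ active → ∀ b ∈ r, crossing a b = none) →
    (∀ a ∈ active, a ∈ seen) →
    (∀ x, x ∈ pts ↔ x ∈ pairPts seen) →
    ∀ x, x ∈ (r.foldl sweepStep (active, pts)).2 ↔ x ∈ pairPts (seen ++ r) := by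
  induction r with
  | nil => intro seen active pts _ _ _ hpts x; simpa using hpts x
  | cons b r ih =>
    intro seen active pts hpair hdead hsub hpts x
    rw [List.foldl_cons]
    have hble : ∀ b' ∈ r, lox b ≤ lox b' := (List.pairwise_cons.1 hpair).1
    have hstep : sweepStep (active, pts) b =
        (active.filter (fun a => decide (lox b ≤ hix a)) ++ [b],
         (active.filter (fun a => decide (lox b ≤ hix a))).foldl
           (fun pts a =>
             match crossing a b with
             | some p => PySem.Set.add pts p
             | none => pts) pts) := rfl
    rw [hstep, show seen ++ b :: r = (seen ++ [b]) ++ r from by simp]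
    apply ih (seen ++ [b]) _ _ (List.pairwise_cons.1 hpair).2
    · -- dead segments stay dead
      intro a ha hna b' hb'
      rcases List.mem_append.1 ha with ha | ha
      · by_cases hact : a ∈ active
        · by_cases hfil : (lox b ≤ hix a)
          · exact absurd (List.mem_append.2 (Or.inl (List.mem_filter.2 ⟨hact, by simpa using hfil⟩))) hna
          · exact crossing_none_of_lt a b' (lt_of_lt_of_le (by omega) (hble b' hb'))
        · exact hdead a ha hact b' (List.mem_cons_of_mem b hb')
      · exact absurd (List.mem_append.2 (Or.inr (by simpa using List.mem_singleton.1 ha))) hna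
    · intro a ha
      rcases List.mem_append.1 ha with ha | ha
      · exact List.mem_append.2 (Or.inl (hsub a (List.mem_of_mem_filter ha)))
      · exact List.mem_append.2 (Or.inr ha)
    · -- the set now holds the pair points of seen ++ [b]
      intro y
      rw [mem_addFold, mem_pairPts_append_singleton, hpts]
      constructor
      · rintro (hy | ⟨a, ha, hc⟩)
        · exact Or.inl hy
        · exact Or.inr ⟨a, hsub a (List.mem_of_mem_filter ha), hc⟩
      · rintro (hy | ⟨a, ha, hc⟩)
        · exact Or.inl hy
        · refine Or.inr ⟨a, ?_, hc⟩
          by_cases hact : a ∈ active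
          · by_cases hfil : (lox b ≤ hix a)
            · exact List.mem_filter.2 ⟨hact, by simpa using hfil⟩
            · rw [crossing_none_of_lt a b (by omega)] at hc; cases hc
          · rw [hdead a ha hact b (List.mem_cons_self)] at hc; cases hc

-- ===== A reduced to the pair points =====
lemma sfold (m : Nat) :
    (PySem.List.pyRange 1 (1 + (m : Int))).foldl
      (fun s _ =>
        s ++ [PySem.Int.mod (PySem.List.pyGetD s (-1) 0 * PySem.List.pyGetD s (-1) 0) 50515093])
      [290797] = (List.range (m + 1)).map gseq := by
  induction m with
  | zero =>
    simp [PySem.List.pyRange_of_pos, List.range_succ]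
    rfl
  | succ m ih =>
    have h1 : (1 + ((m : Int) + 1)) = (1 + (m : Int)) + 1 := by ring
    rw [show ((↑(m+1) : Int)) = (m : Int) + 1 by push_cast; ring, h1,
       PySem.List.pyRange_one_succ_right (by omega), List.foldl_append, ih]
    simp only [List.foldl_cons, List.foldl_nil]
    rw [show List.range (m+1) = List.range m ++ [m] from List.range_succ, List.map_append]
    simp only [List.map_singleton]
    rw [PySem.List.pyGetD_neg_one_append_singleton]
    simp [List.range_succ, gseq]

lemma take4_range' (a m : Nat) (h : 4 ≤ m) :
    (List.range' a m).take 4 = [a, a + 1, a + 2, a + 3] := by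
  obtain ⟨m', rfl⟩ : ∃ m', m = m' + 4 := ⟨m - 4, by omega⟩
  simp [List.range', List.take]

lemma segsA_eq (n : Nat) : getLineSegments (n : Int) = (List.range n).map quad := by
  unfold getLineSegments
  rw [show (4 * (n : Int) + 1) = (1 + ((4 * n : Nat) : Int)) by push_cast; ring]
  rw [sfold (4 * n)]
  simp only [List.map_map]
  rw [PySem.List.pyRange_of_pos 1 (1 + ((4 * n : Nat) : Int)) (by norm_num)]
  have hcnt : (if (1 : Int) < 1 + ((4 * n : Nat) : Int) then ((1 + ((4 * n : Nat) : Int) - 1 + 4 - 1) / 4).toNat else 0) = n := by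
    rcases Nat.eq_zero_or_pos n with h0 | h0
    · simp [h0]
    · rw [if_pos (by push_cast; omega)]
      have : (1 + ((4 * n : Nat) : Int) - 1 + 4 - 1) = 3 + (n : Int) * 4 := by push_cast; ring
      rw [this, Int.add_mul_ediv_right _ _ (by norm_num)]
      norm_num
  rw [hcnt, List.map_map]
  refine List.map_congr_left ?_
  intro k hk
  simp only [List.mem_range] at hk
  simp only [Function.comp]
  rw [show (1 + 4 * (k : Int)) = ((4 * k + 1 : Nat) : Int) by push_cast; ring,
      show ((4 * k + 1 : Nat) : Int) + 4 = ((4 * k + 5 : Nat) : Int) by push_cast; ring,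
      PySem.List.slice_natCast]
  rw [← List.map_drop, ← List.map_take]
  rw [List.range_eq_range', List.drop_range',
      show 4 * k + 5 - (4 * k + 1) = 4 from by omega,
      take4_range' _ _ (by omega)]
  simp [quad, hseq, Nat.mul_comm]

lemma bfold (n k : Nat) (acc : List (List Int)) :
    (List.range n).foldl
      (fun (acc : Int × List (List Int)) _ =>
        let s1 := PySem.Int.mod (acc.1 * acc.1) 50515093
        let s2 := PySem.Int.mod (s1 * s1) 50515093
        let s3 := PySem.Int.mod (s2 * s2) 50515093
        let s4 := PySem.Int.mod (s3 * s3) 50515093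
        (s4, acc.2 ++
          [[PySem.Int.mod s1 500, PySem.Int.mod s2 500, PySem.Int.mod s3 500, PySem.Int.mod s4 500]]))
      (gseq (4 * k), acc)
    = (gseq (4 * (k + n)), acc ++ (List.range n).map (fun i => quad (k + i))) := by
  induction n generalizing acc with
  | zero => simp
  | succ n ih =>
    rw [List.range_succ, List.foldl_append, ih, List.map_append, List.foldl_cons, List.foldl_nil]
    have e1 : PySem.Int.mod (gseq (4 * (k + n)) * gseq (4 * (k + n))) 50515093 = gseq (4 * (k + n) + 1) := rfl
    have e2 : PySem.Int.mod (gseq (4 * (k + n) + 1) * gseq (4 * (k + n) + 1)) 50515093 = gseq (4 * (k + n) + 2) := rfl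
    have e3 : PySem.Int.mod (gseq (4 * (k + n) + 2) * gseq (4 * (k + n) + 2)) 50515093 = gseq (4 * (k + n) + 3) := rfl
    have e4 : PySem.Int.mod (gseq (4 * (k + n) + 3) * gseq (4 * (k + n) + 3)) 50515093 = gseq (4 * (k + n) + 4) := rfl
    simp only [e1, e2, e3, e4]
    have h4 : 4 * (k + (n + 1)) = 4 * (k + n) + 4 := by omega
    simp [h4, quad, hseq, List.append_assoc]

lemma interFold (a : List Int) (xs : List (List Int)) (st : PySem.Set ((Int × Int) × (Int × Int))) :
    xs.foldl (fun st b =>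
      match getIntersection a b with
      | some x => PySem.Set.add st x
      | none => st) st = (xs.filterMap (crossing a)).foldl PySem.Set.add st := by
  induction xs generalizing st with
  | nil => rfl
  | cons b l ih =>
    rw [List.foldl_cons, List.filterMap_cons, inter_eq a b]
    cases h : crossing a b <;> simp [ih]

lemma combFold (L : List (List Int)) (st : PySem.Set ((Int × Int) × (Int × Int))) :
    (PySem.List.combinations L 2).foldl
      (fun st c =>
        match c with
        | [L1, L2] =>
          match getIntersection L1 L2 with
          | some x => PySem.Set.add st x
          | none => st
        | _ => st) st = (pairPts L).foldl PySem.Set.add st := by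
  induction L generalizing st with
  | nil => rfl
  | cons a xs ih =>
    rw [show (2 : Nat) = 1 + 1 from rfl, PySem.List.combinations_cons_succ,
        PySem.List.combinations_one, List.map_map, List.foldl_append, ih, pairPts,
        List.foldl_append]
    congr 1
    rw [List.foldl_map]
    exact interFold a xs st

lemma probA_eq (N : Int) :
    problem165 N = PySem.Set.len (PySem.Set.ofList (pairPts (getLineSegments N))) := by
  show PySem.Set.len
      ((PySem.List.combinations (getLineSegments N) 2).foldl
        (fun st c =>
          match c with
          | [L1, L2] =>
            match getIntersection L1 L2 with
            | some x => PySem.Set.add st x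
            | none => st
          | _ => st) PySem.Set.empty) = _
  rw [combFold, PySem.Set.ofList_eq_foldl]
  rfl

-- ===== B reduced to the pair points =====
lemma segsB_eq (N : Int) :
    ((PySem.List.pyRange 0 N).foldl
      (fun (acc : Int × List (List Int)) _ =>
        let s1 := PySem.Int.mod (acc.1 * acc.1) 50515093
        let s2 := PySem.Int.mod (s1 * s1) 50515093
        let s3 := PySem.Int.mod (s2 * s2) 50515093
        let s4 := PySem.Int.mod (s3 * s3) 50515093
        (s4, acc.2 ++
          [[PySem.Int.mod s1 500, PySem.Int.mod s2 500, PySem.Int.mod s3 500, PySem.Int.mod s4 500]]))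
      (290797, [])).2 = getLineSegments N := by
  rcases (by omega : N ≤ 0 ∨ 0 < N) with h | h
  · have h1 : PySem.List.pyRange 0 N = [] := by
      rw [PySem.List.pyRange_of_pos 0 N (by norm_num), if_neg (by omega)]; simp
    have h2 : PySem.List.pyRange 1 (4 * N + 1) 4 = [] := by
      rw [PySem.List.pyRange_of_pos 1 (4 * N + 1) (by norm_num), if_neg (by omega)]; simp
    unfold getLineSegments
    rw [h1, h2]
    simp
  · obtain ⟨n, rfl⟩ : ∃ n : Nat, N = (n : Int) := ⟨N.toNat, (Int.toNat_of_nonneg h.le).symm⟩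
    rw [PySem.List.pyRange_zero_natCast, List.foldl_map]
    have hb := bfold n 0 []
    rw [show (gseq (4 * 0), ([] : List (List Int))) = ((290797 : Int), ([] : List (List Int))) from rfl] at hb
    rw [hb, segsA_eq]
    simp

lemma probB_eq (N : Int) :
    problem165_alt N =
      PySem.Set.len
        ((PySem.List.sorted (getLineSegments N) lox).foldl sweepStep ([], PySem.Set.empty)).2 := by
  show PySem.Set.len
      ((PySem.List.sorted
          ((PySem.List.pyRange 0 N).foldl
            (fun (acc : Int × List (List Int)) _ =>
              let s1 := PySem.Int.mod (acc.1 * acc.1) 50515093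
              let s2 := PySem.Int.mod (s1 * s1) 50515093
              let s3 := PySem.Int.mod (s2 * s2) 50515093
              let s4 := PySem.Int.mod (s3 * s3) 50515093
              (s4, acc.2 ++
                [[PySem.Int.mod s1 500, PySem.Int.mod s2 500, PySem.Int.mod s3 500, PySem.Int.mod s4 500]]))
            (290797, [])).2 lox).foldl sweepStep ([], PySem.Set.empty)).2 = _
  rw [segsB_eq]

-- ===== VERDICT (by name: the statement is the Claim_ definition above) =====
theorem problem165_spec : Claim_equal_problem165 := by
  intro N _
  unfold Spec_problem165
  rw [probA_eq, probB_eq]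
  set L := getLineSegments N with hL
  set order := PySem.List.sorted L lox with horder
  have hmem : ∀ x, x ∈ (order.foldl sweepStep ([], PySem.Set.empty)).2 ↔ x ∈ pairPts L := by
    intro x
    rw [sweep_invariant order [] [] PySem.Set.empty
        (PySem.List.sorted_pairwise L lox)
        (by intro a ha; cases ha)
        (by intro a ha; cases ha)
        (by intro y; simp [PySem.Set.empty, pairPts])]
    simpa using pairPts_perm (PySem.List.sorted_perm L lox false) x
  have hperm : (PySem.Set.ofList (pairPts L)).Perm (order.foldl sweepStep ([], PySem.Set.empty)).2 := by
    apply (List.perm_ext_iff_of_nodup (PySem.Set.nodup_ofList _)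
      (sweep_nodup order [] PySem.Set.empty (List.nodup_nil))).2
    intro x
    rw [PySem.Set.mem_ofList, hmem]
  simp [PySem.Set.len, hperm.length_eq]
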